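-- pv_equiv track=rewrite | github.com/lolmaster44/lolmaster44.github.io | Helid/Program/gloss.py | learn
-- ===== SOURCE A (Python) =====
-- def learn(input_text):
--     word_map = {
--         "PLURAL": "ᴘʟ",
--         "ACCUSATIVE": "ᴀᴄᴄ",
--         "GNOMIC": "ɢɴᴏ",
--         "1STPERSON": "1sɢ",
--     }
--
--     words_and_markers = input_text.split()  # Split the gloss by spaces
--     converted_words_and_markers = []
--
--     for item in words_and_markers:
--         components = item.split("-")  # Split each item by hyphens
--         converted_components = []
--         for component in components:
--             if component in word_map:
--                 converted_components.append(word_map[component])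
--             else:
--                 converted_components.append(component)
--         converted_words_and_markers.append("-".join(converted_components))
--
--     return " ".join(converted_words_and_markers)
-- ===== SOURCE B (Python) =====
-- # Single left-to-right character scan: tokens are flushed through the map at
-- # each delimiter instead of split/split/join/join.  (objective: alternative)
-- def learn(input_text):
--     word_map = {
--         "PLURAL": "ᴘʟ",
--         "ACCUSATIVE": "ᴀᴄᴄ",
--         "GNOMIC": "ɢɴᴏ",
--         "1STPERSON": "1sɢ",
--     }
--     out = []
--     tok = []
--     prev_ws = True  # suppresses leading/duplicate spaces
--
--     def flush():
--         s = ''.join(tok)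
--         tok.clear()
--         out.append(word_map.get(s, s))
--
--     for ch in input_text:
--         if ch.isspace():
--             if not prev_ws:
--                 flush()
--                 out.append(' ')
--                 prev_ws = True
--         elif ch == '-':
--             flush()
--             out.append('-')
--             prev_ws = False
--         else:
--             tok.append(ch)
--             prev_ws = False
--     if prev_ws:
--         if out:
--             out.pop()  # drop the trailing separator space
--     else:
--         flush()
--     return ''.join(out)
-- ===== Notes on version B (the rewrite author's own statement) =====
-- stated objective: alternative
-- what changed: Replaces A's split-on-whitespace, per-word split-on-hyphen, lookup and double join by a single left-to-right character scan that accumulates one token at a time and flushes it through the marker map at each space/hyphen/end boundary, collapsing whitespace on the fly.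
import Mathlib
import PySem

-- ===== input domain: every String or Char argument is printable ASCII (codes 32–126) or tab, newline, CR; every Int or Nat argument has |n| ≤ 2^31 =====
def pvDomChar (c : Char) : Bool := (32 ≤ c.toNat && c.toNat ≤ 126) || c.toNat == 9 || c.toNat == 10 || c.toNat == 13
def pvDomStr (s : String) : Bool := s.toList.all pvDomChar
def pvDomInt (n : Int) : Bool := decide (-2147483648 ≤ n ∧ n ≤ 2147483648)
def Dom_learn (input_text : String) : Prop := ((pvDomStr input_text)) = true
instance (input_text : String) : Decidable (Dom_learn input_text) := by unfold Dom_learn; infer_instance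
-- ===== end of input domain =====

-- B replaces A's split-on-spaces / split-on-hyphens / lookup / double join by a single
-- left-to-right character scan that flushes each delimiter-bounded token through the map
-- (objective: alternative; same result, same asymptotic cost).

-- the gloss marker table (shared literal data of both programs)
def pvWordMap : PySem.Dict (List Char) (List Char) :=
  ((((PySem.Dict.empty).insert "PLURAL".toList "ᴘʟ".toList).insert
      "ACCUSATIVE".toList "ᴀᴄᴄ".toList).insert
      "GNOMIC".toList "ɢɴᴏ".toList).insert
      "1STPERSON".toList "1sɢ".toList

-- ===== PORT A =====
def learn (input_text : String) : String :=
  let words := PySem.Chars.split₀ input_text.toList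
  let converted := words.foldl (fun acc item =>
    let comps := PySem.Chars.splitOn item ['-']
    let convComps := comps.foldl (fun a comp =>
      if pvWordMap.contains comp then a ++ [(pvWordMap.get? comp).getD comp]
      else a ++ [comp]) ([] : List (List Char))
    acc ++ [PySem.Chars.join ['-'] convComps]) ([] : List (List Char))
  String.ofList (PySem.Chars.join [' '] converted)

-- ===== PORT B =====
-- word_map.get(s, s)
def pvConvB (t : List Char) : List Char := (pvWordMap.get? t).getD t

-- one step of the scan; state = (out, tok, prev_ws)
def pvStepB (st : List Char × List Char × Bool) (ch : Char) : List Char × List Char × Bool :=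
  if PySem.Chars.isspace ch then
    if st.2.2 then st else (st.1 ++ pvConvB st.2.1 ++ [' '], [], true)
  else if ch = '-' then (st.1 ++ pvConvB st.2.1 ++ ['-'], [], false)
  else (st.1, st.2.1 ++ [ch], false)

def learn_alt (input_text : String) : String :=
  let st := input_text.toList.foldl pvStepB ([], [], true)
  String.ofList (if st.2.2 then st.1.dropLast else st.1 ++ pvConvB st.2.1)

-- ===== PRECONDITION & SPEC =====
def Spec_learn (input_text : String) (out : String) : Prop := out = learn_alt input_text
instance (input_text : String) (out : String) : Decidable (Spec_learn input_text out) := by unfold Spec_learn; infer_instance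

-- ===== CLAIM (what is proved, stated in full; the proofs are below) =====
def Claim_equal_learn : Prop := ∀ (input_text : String), Dom_learn input_text → Spec_learn input_text (learn input_text)

-- ===== LEMMAS AND PROOFS =====

-- A's per-component conversion
def pvConvA (t : List Char) : List Char :=
  if pvWordMap.contains t then (pvWordMap.get? t).getD t else t

lemma pvConvA_eq (t : List Char) : pvConvA t = pvConvB t := by
  unfold pvConvA pvConvB
  rw [PySem.Dict.contains_eq_isSome_get?]
  cases h : pvWordMap.get? t with
  | none => simp
  | some v => simp

-- split on '-' as plain structural recursion
def pvHsplit : List Char → List (List Char)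
  | [] => [[]]
  | c :: cs => if c = '-' then [] :: pvHsplit cs else (pvHsplit cs).modifyHead (fun x => c :: x)

lemma pvHsplit_ne_nil (w : List Char) : pvHsplit w ≠ [] := by
  induction w with
  | nil => simp [pvHsplit]
  | cons c cs ih =>
    simp only [pvHsplit]
    split
    · simp
    · rcases hl : pvHsplit cs with _ | ⟨a, t⟩
      · exact absurd hl ih
      · simp

lemma pvSplitOn_go_eq (fuel : Nat) (l cur : List Char) (acc : List (List Char))
    (h : l.length < fuel) :
    PySem.Chars.splitOn.go ['-'] fuel l cur acc
      = acc.reverse ++ (pvHsplit l).modifyHead (fun x => cur.reverse ++ x) := by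
  induction fuel generalizing l cur acc with
  | zero => omega
  | succ n ih =>
    cases l with
    | nil =>
      simp [PySem.Chars.splitOn.go, pvHsplit]
    | cons c rest =>
      by_cases hc : c = '-'
      · subst hc
        rw [show PySem.Chars.splitOn.go ['-'] (n+1) ('-'::rest) cur acc
              = PySem.Chars.splitOn.go ['-'] n rest [] (cur.reverse :: acc) from by
            simp [PySem.Chars.splitOn.go, List.isPrefixOf]]
        rw [ih rest [] (cur.reverse :: acc) (by simp at h; omega)]
        rcases hl : pvHsplit rest with _ | ⟨a, t⟩
        · exact absurd hl (pvHsplit_ne_nil rest)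
        · simp [pvHsplit, hl]
      · rw [show PySem.Chars.splitOn.go ['-'] (n+1) (c::rest) cur acc
              = PySem.Chars.splitOn.go ['-'] n rest (c::cur) acc from by
            simp [PySem.Chars.splitOn.go, List.isPrefixOf, Ne.symm hc]]
        rw [ih rest (c::cur) acc (by simp at h; omega)]
        rcases hl : pvHsplit rest with _ | ⟨a, t⟩
        · exact absurd hl (pvHsplit_ne_nil rest)
        · simp [pvHsplit, hl, hc]

lemma pvSplitOn_eq_hsplit (s : List Char) : PySem.Chars.splitOn s ['-'] = pvHsplit s := by
  unfold PySem.Chars.splitOn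
  rw [pvSplitOn_go_eq (s.length + 1) s [] [] (by omega)]
  rcases hl : pvHsplit s with _ | ⟨a, t⟩
  · exact absurd hl (pvHsplit_ne_nil s)
  · simp

-- the converted form of one word
def pvW (w : List Char) : List Char := PySem.Chars.join ['-'] ((pvHsplit w).map pvConvA)
-- completed components, each followed by '-'
def pvD (init : List (List Char)) : List Char := (init.map pvConvA).flatMap (· ++ ['-'])
-- output already emitted after the words in acc (split₀.go's accumulator, reversed order)
def pvE (acc : List (List Char)) : List Char := ((acc.reverse).map pvW).flatMap (· ++ [' '])
-- B's finalization
def pvFin (st : List Char × List Char × Bool) : List Char :=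
  if st.2.2 then st.1.dropLast else st.1 ++ pvConvB st.2.1

lemma pvJoin_snoc (sep : List Char) (xs : List (List Char)) (y : List Char) :
    PySem.Chars.join sep (xs ++ [y]) = (xs.flatMap (· ++ sep)) ++ y := by
  induction xs with
  | nil => simp [PySem.Chars.join_singleton]
  | cons a xs ih =>
    rcases hxy : xs ++ [y] with _ | ⟨b, rest⟩
    · simp at hxy
    · rw [List.cons_append, hxy, PySem.Chars.join_cons_cons, ← hxy, ih]
      simp [List.append_assoc]

lemma pvDropLast_flat (ws : List (List Char)) :
    (ws.flatMap (· ++ [' '])).dropLast = PySem.Chars.join [' '] ws := by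
  induction ws with
  | nil => simp [PySem.Chars.join_nil]
  | cons a ws ih =>
    cases ws with
    | nil => simp [PySem.Chars.join_singleton]
    | cons b rest =>
      have hne : (b :: rest).flatMap (· ++ [' ']) ≠ [] := by
        simp [List.flatMap_cons]
      rw [List.flatMap_cons, List.dropLast_append_of_ne_nil hne, ih,
          PySem.Chars.join_cons_cons]

lemma pvW_decomp (w : List Char) (init : List (List Char)) (l : List Char)
    (h : pvHsplit w = init ++ [l]) : pvW w = pvD init ++ pvConvA l := by
  unfold pvW pvD
  rw [h, List.map_append, List.map_singleton, pvJoin_snoc]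

lemma pvHsplit_snoc_hyphen (w : List Char) : pvHsplit (w ++ ['-']) = pvHsplit w ++ [[]] := by
  induction w with
  | nil => simp [pvHsplit]
  | cons c cs ih =>
    by_cases hcc : c = '-'
    · subst hcc
      simp [pvHsplit, ih]
    · rcases hl : pvHsplit cs with _ | ⟨a, t⟩
      · exact absurd hl (pvHsplit_ne_nil cs)
      · simp [pvHsplit, hcc, ih, hl]

lemma pvHsplit_snoc_char (c : Char) (hc : ¬ c = '-') :
    ∀ (w : List Char) (init : List (List Char)) (l : List Char),
      pvHsplit w = init ++ [l] → pvHsplit (w ++ [c]) = init ++ [l ++ [c]] := by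
  intro w
  induction w with
  | nil =>
    intro init l h
    simp only [pvHsplit] at h
    rcases init with _ | ⟨i0, init'⟩
    · simp at h
      subst h
      simp [pvHsplit, hc]
    · simp at h
  | cons a w ih =>
    intro init l h
    by_cases ha : a = '-'
    · subst ha
      simp only [pvHsplit] at h
      rcases init with _ | ⟨i0, init'⟩
      · simp at h
        exact absurd h.2 (pvHsplit_ne_nil w)
      · simp at h
        obtain ⟨h0, h1⟩ := h
        rw [List.cons_append]
        simp only [pvHsplit]
        rw [ih init' l h1, h0]
        simp
    · simp only [pvHsplit, if_neg ha] at h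
      rcases hl : pvHsplit w with _ | ⟨j, t⟩
      · exact absurd hl (pvHsplit_ne_nil w)
      · rw [hl] at h
        simp only [List.modifyHead_cons] at h
        rcases init with _ | ⟨i0, init'⟩
        · simp at h
          obtain ⟨h0, h1⟩ := h
          rw [List.cons_append]
          simp only [pvHsplit, if_neg ha]
          rw [ih [] j (by simp [hl, h1])]
          simp [← h0]
        · simp at h
          obtain ⟨h0, h1⟩ := h
          rw [List.cons_append]
          simp only [pvHsplit, if_neg ha]
          rw [ih (j :: init') l (by simp [hl, h1])]
          simp [h0]

lemma pvMain (cs : List Char) :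
    (∀ acc, pvFin (List.foldl pvStepB (pvE acc, [], true) cs)
        = PySem.Chars.join [' '] ((PySem.Chars.split₀.go cs [] acc).map pvW))
    ∧ (∀ cur acc init l, cur ≠ [] → pvHsplit cur.reverse = init ++ [l] →
        pvFin (List.foldl pvStepB (pvE acc ++ pvD init, l, false) cs)
          = PySem.Chars.join [' '] ((PySem.Chars.split₀.go cs cur acc).map pvW)) := by
  have hsd : PySem.Chars.isspace '-' = false := rfl
  have hcnil : pvConvB [] = ([] : List Char) := by decide
  have hD : pvD [[]] = ['-'] := by simp [pvD, pvConvA_eq, hcnil]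
  induction cs with
  | nil =>
    constructor
    · intro acc
      simp only [List.foldl_nil, pvFin]
      rw [show PySem.Chars.split₀.go [] [] acc = acc.reverse from by
        simp [PySem.Chars.split₀.go]]
      simpa [pvE] using pvDropLast_flat ((acc.reverse).map pvW)
    · intro cur acc init l hcur h
      simp only [List.foldl_nil, pvFin, Bool.false_eq_true, if_false]
      rw [show PySem.Chars.split₀.go [] cur acc = acc.reverse ++ [cur.reverse] from by
        simp [PySem.Chars.split₀.go, hcur]]
      rw [List.map_append, List.map_singleton, pvJoin_snoc,
          pvW_decomp _ _ _ h, pvConvA_eq]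
      simp [pvE, List.append_assoc]
  | cons c cs ih =>
    obtain ⟨ih1, ih2⟩ := ih
    constructor
    · intro acc
      simp only [List.foldl_cons]
      by_cases hs : PySem.Chars.isspace c = true
      · rw [show PySem.Chars.split₀.go (c::cs) [] acc = PySem.Chars.split₀.go cs [] acc from by
            simp [PySem.Chars.split₀.go, hs],
          show pvStepB (pvE acc, [], true) c = (pvE acc, [], true) from by
            simp [pvStepB, hs]]
        exact ih1 acc
      · rw [show PySem.Chars.split₀.go (c::cs) [] acc = PySem.Chars.split₀.go cs [c] acc from by
          simp [PySem.Chars.split₀.go, hs]]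
        by_cases hc : c = '-'
        · subst hc
          rw [show pvStepB (pvE acc, [], true) '-' = (pvE acc ++ pvD [[]], [], false) from by
            simp [pvStepB, hsd, hcnil, hD]]
          exact ih2 ['-'] acc [[]] [] (by simp) (by simp [pvHsplit])
        · rw [show pvStepB (pvE acc, [], true) c = (pvE acc ++ pvD [], [c], false) from by
            simp [pvStepB, hs, hc, pvD]]
          exact ih2 [c] acc [] [c] (by simp) (by simp [pvHsplit, hc])
    · intro cur acc init l hcur h
      simp only [List.foldl_cons]
      by_cases hs : PySem.Chars.isspace c = true
      · rw [show PySem.Chars.split₀.go (c::cs) cur acc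
              = PySem.Chars.split₀.go cs [] (cur.reverse :: acc) from by
            simp [PySem.Chars.split₀.go, hs, hcur],
          show pvStepB (pvE acc ++ pvD init, l, false) c = (pvE (cur.reverse :: acc), [], true) from by
            simp [pvStepB, hs, pvE, pvW_decomp _ _ _ h, pvConvA_eq, List.append_assoc]]
        exact ih1 (cur.reverse :: acc)
      · rw [show PySem.Chars.split₀.go (c::cs) cur acc
            = PySem.Chars.split₀.go cs (c::cur) acc from by
          simp [PySem.Chars.split₀.go, hs]]
        by_cases hc : c = '-'
        · subst hc
          rw [show pvStepB (pvE acc ++ pvD init, l, false) '-'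
              = (pvE acc ++ pvD (init ++ [l]), [], false) from by
            simp [pvStepB, hsd, pvD, pvConvA_eq, List.append_assoc]]
          exact ih2 ('-'::cur) acc (init ++ [l]) [] (by simp)
            (by rw [List.reverse_cons, pvHsplit_snoc_hyphen, h])
        · rw [show pvStepB (pvE acc ++ pvD init, l, false) c
              = (pvE acc ++ pvD init, l ++ [c], false) from by
            simp [pvStepB, hs, hc]]
          exact ih2 (c::cur) acc init (l ++ [c]) (by simp)
            (by rw [List.reverse_cons]; exact pvHsplit_snoc_char c hc cur.reverse init l h)

-- ===== VERDICT (by name: the statement is the Claim_ definition above) =====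
theorem learn_spec : Claim_equal_learn := by
  intro s _
  unfold Spec_learn learn learn_alt
  have hinner : (fun (a : List (List Char)) comp =>
      if pvWordMap.contains comp then a ++ [(pvWordMap.get? comp).getD comp]
      else a ++ [comp]) = fun a comp => a ++ [pvConvA comp] := by
    funext a comp
    unfold pvConvA
    split <;> rfl
  simp only [hinner, PySem.List.foldl_append_singleton_eq_map, List.nil_append]
  have houter : (fun item => PySem.Chars.join ['-'] ((PySem.Chars.splitOn item ['-']).map pvConvA))
      = pvW := by
    funext item
    rw [pvSplitOn_eq_hsplit, pvW]
  rw [houter]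
  have hb := (pvMain s.toList).1 []
  simp only [pvE, List.reverse_nil, List.map_nil, List.flatMap_nil] at hb
  rw [show PySem.Chars.split₀ s.toList = PySem.Chars.split₀.go s.toList [] [] from rfl]
  rw [← hb]
  rfl
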